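-- pv_equiv track=rewrite | github.com/mehul-tandel/Data_Structures_and_Algorithms | python/Searching_and_Sorting/ekoSpoj.py | search_optimal_saw_height
-- ===== SOURCE A (Python) =====
-- def cutsMinRequireWood(tree_heights,min_wood_required,saw_height):
--
--     total_wood_cut = 0
--
--     for i in range(len(tree_heights)):
--
--         # if current_tree's height is greater than saw's height, extra height of tree is cut and added to pile of total_wood_cut.
--         if tree_heights[i] > saw_height :
--             total_wood_cut += (tree_heights[i]-saw_height)
--
--             # check if pile of total_wood_cut has accumulated minimum_wood_required.
--             if total_wood_cut >= min_wood_required :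
--                 return True
--
--     return False
--
-- def search_optimal_saw_height(n,m,tree_heights): # n = no. of trees, m = minimum wood required.
--
--     tree_heights.sort()
--     start = 0
--     end = 10**6  #max height of a tree possible(given in constraints)
--     saw_height = 0 #initialize the saw height to worst case(0) where all trees needs to be cut fully
--
--     while start <= end :
--         mid = start + (end-start)//2
--
--         if cutsMinRequireWood(tree_heights,m,mid):
--             saw_height = mid
--             start = mid + 1
--         else:
--             end = mid - 1
--
--     return saw_height
-- ===== SOURCE B (Python) =====
-- # Closed-form segment scan over suffix sums of the descending-sorted list, instead of
-- # binary search with repeated O(n) feasibility scans. Mutates tree_heights by sorting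
-- # it in place, exactly as the original does.
-- def search_optimal_saw_height(n, m, tree_heights):
--     tree_heights.sort()
--     desc = tree_heights[::-1]
--     need = max(m, 1)  # the original's early-return check makes m <= 0 behave like m == 1
--     best = 0
--     suf = 0
--     for i in range(len(desc)):
--         h = desc[i]
--         suf += h
--         lo = max(desc[i + 1], 0) if i + 1 < len(desc) else 0
--         hi = min(h - 1, 10**6)
--         if lo <= hi:
--             # on [lo, hi] the wood cut at height H is suf - (i+1)*H
--             cand = (suf - need) // (i + 1)
--             if lo <= cand:
--                 best = max(best, min(cand, hi))
--     return best
-- ===== Notes on version B (the rewrite author's own statement) =====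
-- stated objective: alternative
-- what changed: Replaces the binary search over heights 0..10^6 with repeated O(n) feasibility scans by a single closed-form pass over the descending-sorted list: suffix sums make wood(H) piecewise linear, and each segment's optimum is computed by one floor division.
import Mathlib
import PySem

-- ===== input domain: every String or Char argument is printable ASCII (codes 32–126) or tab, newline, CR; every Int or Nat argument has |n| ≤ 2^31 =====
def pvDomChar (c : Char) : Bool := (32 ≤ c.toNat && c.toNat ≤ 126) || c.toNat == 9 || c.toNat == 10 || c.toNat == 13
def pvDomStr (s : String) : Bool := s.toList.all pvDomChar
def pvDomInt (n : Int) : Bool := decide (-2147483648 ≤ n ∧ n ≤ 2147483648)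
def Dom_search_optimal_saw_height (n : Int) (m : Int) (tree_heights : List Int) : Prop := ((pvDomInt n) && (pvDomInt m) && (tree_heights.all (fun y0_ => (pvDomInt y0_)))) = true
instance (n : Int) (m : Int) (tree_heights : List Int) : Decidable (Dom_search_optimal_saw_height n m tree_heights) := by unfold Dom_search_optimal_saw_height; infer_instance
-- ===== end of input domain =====

-- B replaces A's binary search (with its O(n) feasibility scans) by one closed-form pass over
-- the descending-sorted list; equivalence is about the RETURN value — both A and B sort
-- tree_heights in place, so the caller-visible mutation is identical.

-- ===== PORT A =====
-- cutsMinRequireWood: scan with a running total and early return True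
def pvCutsAux (hs : List Int) (mreq saw total : Int) : Bool :=
  match hs with
  | [] => false
  | h :: t =>
    if saw < h then
      (if mreq ≤ total + (h - saw) then true else pvCutsAux t mreq saw (total + (h - saw)))
    else pvCutsAux t mreq saw total

-- the while loop of A's binary search; the fuel argument only makes the recursion
-- structural: 10^6+1 ≥ the interval length, which shrinks by at least 1 per iteration,
-- so the fuel never runs out before start > end
def pvLoopA (hs : List Int) (m : Int) (fuel : Nat) (start e saw : Int) : Int :=
  match fuel with
  | 0 => saw
  | fuel + 1 =>
    if start ≤ e then
      let mid := start + PySem.Int.floordiv (e - start) 2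
      if pvCutsAux hs m mid 0 then pvLoopA hs m fuel (mid + 1) e mid
      else pvLoopA hs m fuel start (mid - 1) saw
    else saw

def search_optimal_saw_height (n : Int) (m : Int) (tree_heights : List Int) : Int :=
  pvLoopA (PySem.List.sorted tree_heights (fun x => x) false) m 1000001 0 1000000 0

-- ===== PORT B =====
-- the for-loop of Source B over the descending list: c = count of trees already above,
-- suf = their height sum, lo peeks the next element (desc[i+1])
def pvSegLoop (l : List Int) (need c suf best : Int) : Int :=
  match l with
  | [] => best
  | h :: t =>
    let c' := c + 1
    let suf' := suf + h
    let lo := match t with | [] => 0 | h2 :: _ => max h2 0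
    let hi := min (h - 1) 1000000
    let best' :=
      if lo ≤ hi then
        (if lo ≤ PySem.Int.floordiv (suf' - need) c'
         then max best (min (PySem.Int.floordiv (suf' - need) c') hi) else best)
      else best
    pvSegLoop t need c' suf' best'

-- tree_heights[::-1] is List.reverse (PySem.List.slice?_none_none_neg_one)
def search_optimal_saw_height_alt (n : Int) (m : Int) (tree_heights : List Int) : Int :=
  pvSegLoop (PySem.List.sorted tree_heights (fun x => x) false).reverse (max m 1) 0 0 0

-- ===== PRECONDITION & SPEC =====
def Spec_search_optimal_saw_height (n : Int) (m : Int) (tree_heights : List Int) (out : Int) : Prop := out = search_optimal_saw_height_alt n m tree_heights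
instance (n : Int) (m : Int) (tree_heights : List Int) (out : Int) : Decidable (Spec_search_optimal_saw_height n m tree_heights out) := by unfold Spec_search_optimal_saw_height; infer_instance

-- ===== CLAIM (what is proved, stated in full; the proofs are below) =====
def Claim_equal_search_optimal_saw_height : Prop := ∀ (n : Int) (m : Int) (tree_heights : List Int), Dom_search_optimal_saw_height n m tree_heights → Spec_search_optimal_saw_height n m tree_heights (search_optimal_saw_height n m tree_heights)

-- ===== LEMMAS AND PROOFS =====

-- wood cut at saw height H
def pvWood (hs : List Int) (H : Int) : Int := (hs.map (fun x => max (x - H) 0)).sum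

-- the unique value both programs compute: the largest feasible height in [0, 10^6], else 0
def pvGood (hs : List Int) (need r : Int) : Prop :=
  0 ≤ r ∧ r ≤ 1000000 ∧ (need ≤ pvWood hs r ∨ r = 0) ∧
    ∀ H, r < H → H ≤ 1000000 → ¬ need ≤ pvWood hs H

lemma pvWood_nonneg (hs : List Int) (H : Int) : 0 ≤ pvWood hs H := by
  induction hs with
  | nil => simp [pvWood]
  | cons h t ih => simp only [pvWood, List.map_cons, List.sum_cons] at *; omega

lemma pvWood_anti (hs : List Int) {H1 H2 : Int} (hle : H1 ≤ H2) :
    pvWood hs H2 ≤ pvWood hs H1 := by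
  induction hs with
  | nil => simp [pvWood]
  | cons h t ih => simp only [pvWood, List.map_cons, List.sum_cons] at *; omega

lemma pvWood_append (a b : List Int) (H : Int) :
    pvWood (a ++ b) H = pvWood a H + pvWood b H := by
  simp [pvWood]

lemma pvWood_reverse (hs : List Int) (H : Int) : pvWood hs.reverse H = pvWood hs H := by
  unfold pvWood
  rw [List.map_reverse, List.sum_reverse]

lemma pvWood_of_all_le (hs : List Int) (H : Int) (h : ∀ x ∈ hs, x ≤ H) :
    pvWood hs H = 0 := by
  induction hs with
  | nil => simp [pvWood]
  | cons a t ih =>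
    have ha := h a (by simp)
    simp only [pvWood, List.map_cons, List.sum_cons] at *
    rw [ih (fun x hx => h x (by simp [hx]))]
    omega

lemma pvWood_of_all_gt (hs : List Int) (H : Int) (h : ∀ x ∈ hs, H < x) :
    pvWood hs H = hs.sum - hs.length * H := by
  induction hs with
  | nil => simp [pvWood]
  | cons a t ih =>
    have ha := h a (by simp)
    simp only [pvWood, List.map_cons, List.sum_cons, List.length_cons] at *
    rw [ih (fun x hx => h x (by simp [hx]))]
    push_cast
    ring_nf
    omega

lemma pvGood_unique (hs : List Int) (need r1 r2 : Int)
    (g1 : pvGood hs need r1) (g2 : pvGood hs need r2) : r1 = r2 := by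
  obtain ⟨a1, b1, c1, d1⟩ := g1
  obtain ⟨a2, b2, c2, d2⟩ := g2
  by_contra hne
  rcases lt_or_gt_of_ne hne with h | h
  · have := d1 r2 h b2
    rcases c2 with hc | hc
    · exact this hc
    · omega
  · have := d2 r1 h b1
    rcases c1 with hc | hc
    · exact this hc
    · omega

lemma pvCutsAux_iff (hs : List Int) (mreq saw t : Int) :
    pvCutsAux hs mreq saw t = true ↔ (mreq ≤ t + pvWood hs saw ∧ 0 < pvWood hs saw) := by
  induction hs generalizing t with
  | nil => simp [pvCutsAux, pvWood]
  | cons h tl ih =>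
    have hnn := pvWood_nonneg tl saw
    simp only [pvWood] at hnn
    simp only [pvCutsAux]
    split_ifs with h1 h2
    · simp only [true_iff, pvWood, List.map_cons, List.sum_cons]
      have hm : max (h - saw) 0 = h - saw := by omega
      rw [hm]
      omega
    · rw [ih]
      simp only [pvWood, List.map_cons, List.sum_cons]
      have hm : max (h - saw) 0 = h - saw := by omega
      rw [hm]
      omega
    · rw [ih]
      simp only [pvWood, List.map_cons, List.sum_cons]
      have hm : max (h - saw) 0 = 0 := by omega
      rw [hm]
      omega

lemma pvCuts_iff (hs : List Int) (m saw : Int) :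
    pvCutsAux hs m saw 0 = true ↔ max m 1 ≤ pvWood hs saw := by
  rw [pvCutsAux_iff]; omega

-- the binary-search invariant: pvLoopA lands on the unique pvGood value
lemma pvLoopA_good (hs : List Int) (m : Int) :
    ∀ (fuel : Nat) (start e saw : Int), (e + 1 - start).toNat ≤ fuel →
    0 ≤ start → start ≤ e + 1 → e ≤ 1000000 →
    ((start = 0 ∧ saw = 0) ∨ (1 ≤ start ∧ saw = start - 1 ∧ max m 1 ≤ pvWood hs saw)) →
    (∀ H, e < H → H ≤ 1000000 → ¬ max m 1 ≤ pvWood hs H) →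
    pvGood hs (max m 1) (pvLoopA hs m fuel start e saw) := by
  intro fuel
  induction fuel with
  | zero =>
    intro start e saw hfuel h0 hse h1e hsaw hcov
    have hempty : e < start := by omega
    simp only [pvLoopA]
    rcases hsaw with ⟨hs0, hw0⟩ | ⟨hs1, hw1, hw2⟩
    · exact ⟨by omega, by omega, Or.inr hw0, fun H hH h1H => hcov H (by omega) h1H⟩
    · exact ⟨by omega, by omega, Or.inl hw2, fun H hH h1H => hcov H (by omega) h1H⟩
  | succ fuel ih =>
    intro start e saw hfuel h0 hse h1e hsaw hcov
    simp only [pvLoopA]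
    by_cases hle : start ≤ e
    · rw [if_pos hle]
      have h2 : (0:Int) < 2 := by norm_num
      have hfd := PySem.Int.floordiv_eq_ediv_of_pos (a := e - start) h2
      have hq0 : 0 ≤ (e - start) / 2 := Int.ediv_nonneg (by omega) (by norm_num)
      have hq1 : (e - start) / 2 ≤ e - start := Int.ediv_le_self _ (by omega)
      have hmid1 : start ≤ start + PySem.Int.floordiv (e - start) 2 := by omega
      have hmid2 : start + PySem.Int.floordiv (e - start) 2 ≤ e := by omega
      by_cases hcut : pvCutsAux hs m (start + PySem.Int.floordiv (e - start) 2) 0 = true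
      · rw [if_pos hcut]
        exact ih _ e _ (by omega) (by omega) (by omega) h1e
          (Or.inr ⟨by omega, by omega, (pvCuts_iff hs m _).mp hcut⟩) hcov
      · rw [if_neg hcut]
        have hnf : ¬ max m 1 ≤ pvWood hs (start + PySem.Int.floordiv (e - start) 2) := by
          intro hcon; rw [← pvCuts_iff] at hcon; exact hcut hcon
        refine ih start _ saw (by omega) h0 (by omega) (by omega) hsaw ?_
        intro H hH h1H hfeas
        by_cases hcase : e < H
        · exact hcov H hcase h1H hfeas
        · have hmH : start + PySem.Int.floordiv (e - start) 2 ≤ H := by omega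
          exact hnf (le_trans hfeas (pvWood_anti hs hmH))
    · rw [if_neg hle]
      rcases hsaw with ⟨hs0, hw0⟩ | ⟨hs1, hw1, hw2⟩
      · exact ⟨by omega, by omega, Or.inr hw0, fun H hH h1H => hcov H (by omega) h1H⟩
      · exact ⟨by omega, by omega, Or.inl hw2, fun H hH h1H => hcov H (by omega) h1H⟩

-- next-segment lower boundary for B's pass
def pvBound (l : List Int) : Int := match l with | [] => 0 | h :: _ => max h 0

-- pvSegLoop's one unfolding step, with the inline match written as pvBound
lemma pvSegLoop_cons (h : Int) (t : List Int) (need c suf best : Int) :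
    pvSegLoop (h :: t) need c suf best =
      pvSegLoop t need (c + 1) (suf + h)
        (if pvBound t ≤ min (h - 1) 1000000 then
           (if pvBound t ≤ PySem.Int.floordiv (suf + h - need) (c + 1)
            then max best (min (PySem.Int.floordiv (suf + h - need) (c + 1)) (min (h - 1) 1000000))
            else best)
         else best) := by
  cases t <;> rfl

-- the segment-scan invariant: pvSegLoop lands on the unique pvGood value
lemma pvSegLoop_good (need : Int) (hneed : 1 ≤ need) :
    ∀ (l pre : List Int) (best : Int),
    List.Pairwise (fun a b => b ≤ a) (pre ++ l) →
    0 ≤ best → best ≤ 1000000 →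
    (need ≤ pvWood (pre ++ l) best ∨ best = 0) →
    (∀ H, best < H → H ≤ 1000000 → pvBound l ≤ H → ¬ need ≤ pvWood (pre ++ l) H) →
    pvGood (pre ++ l) need (pvSegLoop l need pre.length pre.sum best) := by
  intro l
  induction l with
  | nil =>
    intro pre best hpw hb0 hb1 hbf hcov
    simp only [pvSegLoop]
    refine ⟨hb0, hb1, hbf, ?_⟩
    intro H hH h1H
    exact hcov H hH h1H (by simp [pvBound]; omega)
  | cons h t ih =>
    intro pre best hpw hb0 hb1 hbf hcov
    have hS : (pre ++ [h]) ++ t = pre ++ h :: t := by simp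
    have hc'pos : (0:Int) < (pre.length : Int) + 1 := by positivity
    have hpw' : List.Pairwise (fun a b => b ≤ a) ((pre ++ [h]) ++ t) := by rw [hS]; exact hpw
    obtain ⟨hpw_pre, hpw_ht, hcross⟩ := List.pairwise_append.mp hpw
    have hpre_ge : ∀ x ∈ pre, h ≤ x := fun x hx => hcross x hx h (by simp)
    have ht_le : ∀ x ∈ t, x ≤ pvBound t := by
      cases t with
      | nil => simp
      | cons h2 t2 =>
        intro x hx
        rcases List.mem_cons.mp hx with rfl | hx2
        · simp [pvBound]
        · have h1 := (List.pairwise_cons.mp (List.pairwise_cons.mp hpw_ht).2).1 x hx2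
          simp only [pvBound]
          omega
    have hlo0 : 0 ≤ pvBound t := by cases t <;> simp [pvBound]
    have seg_eq : ∀ H, pvBound t ≤ H → H < h →
        pvWood (pre ++ h :: t) H = pre.sum + h - ((pre.length : Int) + 1) * H := by
      intro H hlo hhi
      have hgt : ∀ x ∈ pre ++ [h], H < x := by
        intro x hx
        rcases List.mem_append.mp hx with hx | hx
        · exact lt_of_lt_of_le hhi (hpre_ge x hx)
        · simp at hx; omega
      have hle' : ∀ x ∈ t, x ≤ H := fun x hx => le_trans (ht_le x hx) hlo
      rw [← hS, pvWood_append, pvWood_of_all_gt _ _ hgt, pvWood_of_all_le _ _ hle']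
      simp only [List.sum_append, List.sum_cons, List.sum_nil, List.length_append,
        List.length_cons, List.length_nil]
      push_cast
      ring
    have feas_iff : ∀ H, pvBound t ≤ H → H < h →
        (need ≤ pvWood (pre ++ h :: t) H ↔
         H ≤ PySem.Int.floordiv (pre.sum + h - need) ((pre.length : Int) + 1)) := by
      intro H hlo hhi
      rw [seg_eq H hlo hhi, PySem.Int.le_floordiv_iff_mul_le hc'pos, mul_comm]
      constructor <;> intro hx <;> linarith
    rw [pvSegLoop_cons]
    set cand := PySem.Int.floordiv (pre.sum + h - need) ((pre.length : Int) + 1) with hcand_def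
    set best' := (if pvBound t ≤ min (h - 1) 1000000 then
           (if pvBound t ≤ cand
            then max best (min cand (min (h - 1) 1000000))
            else best)
         else best) with hbest'
    have hbb' : best ≤ best' := by
      rw [hbest']; split_ifs with h1 h2
      · exact le_max_left _ _
      · exact le_refl _
      · exact le_refl _
    have hb'0 : 0 ≤ best' := le_trans hb0 hbb'
    have hb'1 : best' ≤ 1000000 := by
      rw [hbest']; split_ifs with h1 h2
      · exact max_le hb1 (le_trans (min_le_right _ _) (min_le_right _ _))
      · exact hb1
      · exact hb1
    have hb'feas : need ≤ pvWood (pre ++ h :: t) best' ∨ best' = 0 := by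
      rw [hbest']; split_ifs with h1 h2
      · rcases max_choice best (min cand (min (h - 1) 1000000)) with hmx | hmx <;> rw [hmx]
        · exact hbf
        · left
          have hlo : pvBound t ≤ min cand (min (h - 1) 1000000) := le_min h2 h1
          have hhi : min cand (min (h - 1) 1000000) < h :=
            lt_of_le_of_lt (le_trans (min_le_right _ _) (min_le_left _ _)) (by omega)
          rw [feas_iff _ hlo hhi]
          exact min_le_left _ _
      · exact hbf
      · exact hbf
    have hcov' : ∀ H, best' < H → H ≤ 1000000 → pvBound t ≤ H →
        ¬ need ≤ pvWood (pre ++ h :: t) H := by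
      intro H hH h1H hloH
      have h0H : 0 ≤ H := le_of_lt (lt_of_le_of_lt hb'0 hH)
      by_cases hHh : H < h
      · rw [feas_iff H hloH hHh]
        intro hle
        have hmem : pvBound t ≤ min (h - 1) 1000000 := le_trans hloH (le_min (by omega) h1H)
        rw [hbest'] at hH
        simp only [hmem, if_true] at hH
        by_cases h2 : pvBound t ≤ cand
        · simp only [h2, if_true] at hH
          have hH2 : min cand (min (h - 1) 1000000) < H := lt_of_le_of_lt (le_max_right _ _) hH
          have : H ≤ min cand (min (h - 1) 1000000) := le_min hle (le_min (by omega) h1H)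
          omega
        · exact h2 (le_trans hloH hle)
      · have hmaxle : pvBound (h :: t) ≤ H := by
          simp only [pvBound]; exact max_le (by omega) h0H
        exact hcov H (lt_of_le_of_lt hbb' hH) h1H hmaxle
    have hres := ih (pre ++ [h]) best' hpw' hb'0 hb'1 (by rw [hS]; exact hb'feas)
      (by intro H a b c; rw [hS]; exact hcov' H a b c)
    have hlen : ((pre ++ [h]).length : Int) = (pre.length : Int) + 1 := by
      simp
    have hsum : (pre ++ [h]).sum = pre.sum + h := by simp
    rw [hlen, hsum, hS] at hres
    exact hres

lemma pvGood_reverse (hs : List Int) (need r : Int) :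
    pvGood hs.reverse need r ↔ pvGood hs need r := by
  simp [pvGood, pvWood_reverse]

lemma all_le_of_bound (l : List Int) (H : Int)
    (hpw : List.Pairwise (fun a b => b ≤ a) l) (hb : pvBound l ≤ H) : ∀ x ∈ l, x ≤ H := by
  cases l with
  | nil => simp
  | cons h0 t =>
    intro x hx
    have hh0 : h0 ≤ H := le_trans (le_max_left _ _) hb
    rcases List.mem_cons.mp hx with rfl | hx2
    · exact hh0
    · exact le_trans ((List.pairwise_cons.mp hpw).1 x hx2) hh0

-- ===== VERDICT (by name: the statement is the Claim_ definition above) =====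
theorem search_optimal_saw_height_spec : Claim_equal_search_optimal_saw_height := by
  intro n m ths _
  unfold Spec_search_optimal_saw_height search_optimal_saw_height search_optimal_saw_height_alt
  set s := PySem.List.sorted ths (fun x => x) false with hs
  have hpws : List.Pairwise (fun a b : Int => a ≤ b) s := PySem.List.sorted_pairwise _ _
  have hpwr : List.Pairwise (fun a b : Int => b ≤ a) s.reverse := by
    rw [List.pairwise_reverse]; exact hpws
  apply pvGood_unique s (max m 1)
  · apply pvLoopA_good s m 1000001 0 1000000 0 (by norm_num) (by norm_num) (by norm_num)
      (le_refl _) (Or.inl ⟨rfl, rfl⟩)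
    intro H hH h1H
    omega
  · rw [← pvGood_reverse]
    have hcov0 : ∀ H : Int, (0:Int) < H → H ≤ 1000000 → pvBound s.reverse ≤ H →
        ¬ max m 1 ≤ pvWood (([] : List Int) ++ s.reverse) H := by
      intro H _ _ hb hfe
      rw [List.nil_append, pvWood_of_all_le _ _ (all_le_of_bound _ _ hpwr hb)] at hfe
      omega
    have hgood := pvSegLoop_good (max m 1) (le_max_right m 1) s.reverse []
      0 (by rw [List.nil_append]; exact hpwr) (le_refl 0) (by norm_num) (Or.inr rfl) hcov0
    simpa using hgood
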